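-- pv_equiv track=rewrite | github.com/GrahamStrickland/epi | ch05/tests/test_dutch_national_flag_bool_values.py | is_partitioned
-- ===== SOURCE A (Python) =====
-- from typing import List
--
-- def is_partitioned(A: List[int]) -> bool:
--     first_section = True
--     for key in A:
--         if first_section and key:
--             first_section = False
--         if not first_section and not key:
--             return False
--     return True
-- ===== SOURCE B (Python) =====
-- def is_partitioned(A):
--     # Sort-and-compare: the truthiness signature must already be in sorted
--     # (ascending) order, i.e. all falsy elements precede all truthy ones.
--     x = [1 if k else 0 for k in A]
--     return x == sorted(x)
-- ===== Notes on version B (the rewrite author's own statement) =====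
-- stated objective: alternative
-- what changed: Replaces the stateful single-pass flag scan by sort-and-compare: map each element to its 0/1 truthiness and check that the resulting list equals its sorted copy.
import Mathlib
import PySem

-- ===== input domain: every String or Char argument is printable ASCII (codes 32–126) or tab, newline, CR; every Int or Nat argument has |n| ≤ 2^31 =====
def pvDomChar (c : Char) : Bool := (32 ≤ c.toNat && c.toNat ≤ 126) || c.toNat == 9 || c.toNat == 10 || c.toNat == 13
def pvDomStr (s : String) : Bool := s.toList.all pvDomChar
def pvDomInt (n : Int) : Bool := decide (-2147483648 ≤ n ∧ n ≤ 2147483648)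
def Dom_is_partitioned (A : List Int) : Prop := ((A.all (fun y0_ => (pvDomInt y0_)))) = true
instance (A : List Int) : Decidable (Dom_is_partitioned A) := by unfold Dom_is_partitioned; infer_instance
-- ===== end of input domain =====

-- B replaces A's stateful running-flag scan by sort-and-compare on the 0/1 truthiness signature (alternative algorithm; return value only).


-- ===== PORT A =====
-- A's loop: running flag first_section, early return False; structural recursion over A.
def isPartitionedLoop (firstSection : Bool) : List Int → Bool
  | [] => true
  | k :: ks =>
    let fs := if firstSection && (k ≠ 0) then false else firstSection
    if !fs && k = 0 then false
    else isPartitionedLoop fs ks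

def is_partitioned (A : List Int) : Bool := isPartitionedLoop true A

-- ===== PORT B =====
-- B: map each element to its 0/1 truthiness, then compare the list with sorted(list).
def is_partitioned_alt (A : List Int) : Bool :=
  let x := A.map (fun k => if k ≠ 0 then (1 : Int) else 0)
  decide (x = PySem.List.sorted x (fun v => v) false)

-- ===== PRECONDITION & SPEC =====
def Spec_is_partitioned (A : List Int) (out : Bool) : Prop := out = is_partitioned_alt A
instance (A : List Int) (out : Bool) : Decidable (Spec_is_partitioned A out) := by unfold Spec_is_partitioned; infer_instance

-- ===== CLAIM (what is proved, stated in full; the proofs are below) =====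
def Claim_equal_is_partitioned : Prop := ∀ (A : List Int), Dom_is_partitioned A → Spec_is_partitioned A (is_partitioned A)

-- ===== LEMMAS AND PROOFS =====
-- once A's flag has dropped, the loop just checks every remaining element is truthy
theorem loop_false_eq_all (l : List Int) :
    isPartitionedLoop false l = l.all (fun x => x ≠ 0) := by
  induction l with
  | nil => rfl
  | cons k ks ih =>
    simp only [isPartitionedLoop, List.all_cons]
    by_cases hk : k = 0 <;> simp [hk, ih]

-- A's result characterised: the 0/1 truthiness signature is weakly increasing
theorem loop_true_iff_pairwise (l : List Int) :
    isPartitionedLoop true l = true ↔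
      (l.map (fun k => if k ≠ 0 then (1 : Int) else 0)).Pairwise (fun a b => a ≤ b) := by
  induction l with
  | nil => simp [isPartitionedLoop]
  | cons k ks ih =>
    by_cases hk : k = 0
    · simp only [isPartitionedLoop, hk]
      rw [List.map_cons, List.pairwise_cons]
      constructor
      · intro h
        refine ⟨?_, by simpa [hk] using ih.mp (by simpa [hk] using h)⟩
        intro b hb
        rcases List.mem_map.mp hb with ⟨y, _, rfl⟩
        split_ifs <;> omega
      · intro h
        simpa [hk] using ih.mpr (by simpa [hk] using h.2)
    · simp only [isPartitionedLoop]
      rw [show ((if (true && decide ¬k = 0) = true then false else true) = false) by simp [hk]]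
      rw [show (if (!false && decide (k = 0)) = true then false
            else isPartitionedLoop false ks) = isPartitionedLoop false ks by simp [hk]]
      rw [loop_false_eq_all]
      constructor
      · intro h
        refine List.pairwise_cons.mpr ⟨?_, ?_⟩
        · intro b hb
          rcases List.mem_map.mp hb with ⟨y, hy, rfl⟩
          have := List.all_eq_true.mp h y hy
          simp [hk, show y ≠ 0 by simpa using this]
        · -- all elements map to 1, so the tail is pairwise ≤
          refine List.pairwise_map.mpr (List.pairwise_iff_forall_sublist.mpr ?_)
          intro a b hsub
          have ha' := List.all_eq_true.mp h a (hsub.subset (by simp))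
          have hb' := List.all_eq_true.mp h b (hsub.subset (by simp))
          simp_all
      · intro h
        refine List.all_eq_true.mpr ?_
        intro y hy
        have hcons := List.pairwise_cons.mp h
        have h1 : (if k ≠ 0 then (1 : Int) else 0) ≤ (if y ≠ 0 then (1 : Int) else 0) :=
          hcons.1 _ (List.mem_map.mpr ⟨y, hy, rfl⟩)
        by_cases hy0 : y = 0
        · simp [hy0, hk] at h1
        · simpa using hy0

-- ===== VERDICT (by name: the statement is the Claim_ definition above) =====
theorem is_partitioned_spec : Claim_equal_is_partitioned := by
  intro A _
  unfold Spec_is_partitioned is_partitioned is_partitioned_alt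
  set x := A.map (fun k => if k ≠ 0 then (1 : Int) else 0) with hx
  by_cases h : isPartitionedLoop true A = true
  · rw [h]
    have hp := (loop_true_iff_pairwise A).mp h
    rw [← hx] at hp
    simp [PySem.List.sorted_eq_self_of_pairwise _ _ hp]
  · rw [Bool.eq_false_iff.mpr h]
    symm
    rw [decide_eq_false_iff_not]
    intro heq
    apply h
    apply (loop_true_iff_pairwise A).mpr
    rw [← hx, heq]
    exact (PySem.List.sorted_pairwise x (fun v => v))
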